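-- pv_equiv track=rewrite | github.com/mimikrija/AdventOfCode2017 | python/24.py | find_strongest_bridge
-- ===== SOURCE A (Python) =====
-- from collections import deque
--
-- def bridge_strength(in_bridge):
--     return sum(sum(comp) for comp in in_bridge)
--
-- def find_strongest_bridge(in_bridge, dangling, remaining_components):
--     max_strength = 0
--     incomplete_bridges = deque()
--     incomplete_bridges.append([in_bridge, dangling])
--     while incomplete_bridges:
--         bridge, dangling = incomplete_bridges.popleft()
--         for candidate in (comp for comp in remaining_components if dangling in comp):
--             if candidate not in bridge:
--                 next_dangling = set(candidate) - {dangling}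
--                 if len(next_dangling) != 0:
--                     new_dangling = next_dangling.pop()
--                 else:
--                     new_dangling = dangling
--                 incomplete_bridges.append([bridge + [candidate], new_dangling])
--
--         max_strength = max(max_strength, bridge_strength(bridge))
--
--     return max_strength
-- ===== SOURCE B (Python) =====
-- def find_strongest_bridge(in_bridge, dangling, remaining_components):
--     # Recursive DFS over the tree of bridge extensions instead of A's explicit BFS deque.
--     def best(bridge, dangling):
--         result = sum(a + b for a, b in bridge)
--         for candidate in remaining_components:
--             if dangling in candidate and candidate not in bridge:
--                 rest = set(candidate) - {dangling}
--                 new_dangling = rest.pop() if rest else dangling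
--                 result = max(result, best(bridge + [candidate], new_dangling))
--         return result
--     return max(0, best(in_bridge, dangling))
-- ===== Notes on version B (the rewrite author's own statement) =====
-- stated objective: simpler
-- what changed: Replaced A's explicit BFS worklist (a deque of incomplete bridges processed level by level) with a direct recursive DFS helper that returns the max of the current bridge's strength and the recursive results of each legal extension, seeded with max(0, ...) at the top.
import Mathlib
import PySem

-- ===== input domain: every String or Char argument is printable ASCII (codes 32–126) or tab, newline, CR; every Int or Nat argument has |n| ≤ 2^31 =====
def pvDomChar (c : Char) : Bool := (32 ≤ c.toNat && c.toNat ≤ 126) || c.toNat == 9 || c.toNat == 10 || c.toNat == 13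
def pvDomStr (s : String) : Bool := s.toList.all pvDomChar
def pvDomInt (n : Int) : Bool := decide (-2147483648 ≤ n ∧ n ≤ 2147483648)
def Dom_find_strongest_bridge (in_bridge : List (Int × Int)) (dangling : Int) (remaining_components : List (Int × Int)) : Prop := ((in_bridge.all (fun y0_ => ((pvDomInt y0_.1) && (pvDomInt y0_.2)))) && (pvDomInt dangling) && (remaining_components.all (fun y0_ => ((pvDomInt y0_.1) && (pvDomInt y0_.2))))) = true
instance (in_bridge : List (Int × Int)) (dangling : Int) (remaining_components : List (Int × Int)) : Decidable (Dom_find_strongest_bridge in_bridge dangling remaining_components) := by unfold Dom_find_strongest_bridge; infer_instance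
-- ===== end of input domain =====

-- B replaces A's explicit BFS worklist (deque) by a recursive DFS over the tree of bridge extensions; same return value, neither mutates its arguments.

-- ===== PORT A =====
-- termination lemmas cited by the ports' decreasing_by (they must precede the definitions that cite them)
theorem pvCountLt {α} (l : List α) (Q P : α → Bool)
    (hmono : ∀ x, Q x = true → P x = true) (c : α) (hc : c ∈ l)
    (hP : P c = true) (hQ : Q c = false) :
    l.countP Q < l.countP P := by
  induction l with
  | nil => simp at hc
  | cons a l ih =>
    rw [List.countP_cons, List.countP_cons]
    rcases List.mem_cons.mp hc with rfl | hc'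
    · have hle : l.countP Q ≤ l.countP P := List.countP_mono_left (fun x _ h => hmono x h)
      rw [hP, hQ]; simp; omega
    · have h1 := ih hc'
      by_cases hQa : Q a = true
      · rw [hQa, hmono a hQa]; simp; omega
      · simp only [Bool.not_eq_true] at hQa
        rw [hQa]
        cases hPa : P a <;> simp <;> omega

theorem pvFilterLt (remaining bridge : List (Int × Int)) (c : Int × Int)
    (hc : c ∈ remaining) (hnb : c ∉ bridge) :
    (remaining.filter (fun x => x ∉ bridge ++ [c])).length <
      (remaining.filter (fun x => x ∉ bridge)).length := by
  rw [← List.countP_eq_length_filter, ← List.countP_eq_length_filter]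
  refine pvCountLt remaining _ _ ?_ c hc (by simpa using hnb) (by simp)
  intro x hx
  simp only [decide_eq_true_eq, List.mem_append, List.mem_singleton] at hx ⊢
  intro hxb; exact hx (Or.inl hxb)

-- bridge_strength(in_bridge) = sum(sum(comp) for comp in in_bridge)
def bridge_strength (in_bridge : List (Int × Int)) : Int :=
  (in_bridge.map (fun comp => comp.1 + comp.2)).sum

-- port of `next_dangling = set(candidate) - {dangling}; .pop() if nonempty else dangling`.
-- Exact whenever `dangling in candidate` (the only case either program evaluates it in):
-- the remaining set then has at most one element, so pop() is deterministic.
def pyNewDangling (candidate : Int × Int) (dangling : Int) : Int :=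
  match [candidate.1, candidate.2].filter (fun x => x ≠ dangling) with
  | [] => dangling
  | x :: _ => x

-- termination helper for the BFS worklist loop: size of the extension tree rooted at a state
def treeSize (remaining bridge : List (Int × Int)) (d : Int) : Nat :=
  1 + ((((remaining.filter (fun comp => comp.1 = d ∨ comp.2 = d)).filter
        (fun candidate => candidate ∉ bridge)).attach).map
      (fun x => treeSize remaining (bridge ++ [x.1]) (pyNewDangling x.1 d))).sum
termination_by (remaining.filter (fun x => x ∉ bridge)).length
decreasing_by
  have hx := x.2
  simp only [List.mem_filter, decide_eq_true_eq] at hx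
  exact pvFilterLt remaining bridge x.1 hx.1.1 hx.2

-- the states `[bridge + [candidate], new_dangling]` the loop body appends, in generator order
def pyChildren (remaining bridge : List (Int × Int)) (d : Int) :
    List (List (Int × Int) × Int) :=
  ((remaining.filter (fun comp => comp.1 = d ∨ comp.2 = d)).filter
    (fun candidate => candidate ∉ bridge)).map
    (fun candidate => (bridge ++ [candidate], pyNewDangling candidate d))

theorem pvAttachSum {α : Type} (l : List α) (f : α → Nat) :
    (l.attach.map (fun x => f x.1)).sum = (l.map f).sum := by
  simp

theorem pvTreeSizeEq (remaining bridge : List (Int × Int)) (d : Int) :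
    treeSize remaining bridge d
    = 1 + ((pyChildren remaining bridge d).map (fun s => treeSize remaining s.1 s.2)).sum := by
  rw [treeSize, pyChildren, List.map_map]
  congr 1
  have h := pvAttachSum ((remaining.filter (fun comp => comp.1 = d ∨ comp.2 = d)).filter
      (fun candidate => candidate ∉ bridge))
    (fun c => treeSize remaining (bridge ++ [c]) (pyNewDangling c d))
  rw [h]
  rfl

-- the while-loop over the deque; queue entries are the `[bridge, dangling]` pairs
def bfsLoop (remaining : List (Int × Int)) :
    List (List (Int × Int) × Int) → Int → Int
  | [], max_strength => max_strength
  | (bridge, dangling) :: rest, max_strength =>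
    bfsLoop remaining (rest ++ pyChildren remaining bridge dangling)
      (max max_strength (bridge_strength bridge))
termination_by queue _ => (queue.map (fun s => treeSize remaining s.1 s.2)).sum
decreasing_by
  simp only [List.map_append, List.sum_append, List.map_cons, List.sum_cons]
  rw [pvTreeSizeEq remaining bridge dangling]
  omega

def find_strongest_bridge (in_bridge : List (Int × Int)) (dangling : Int) (remaining_components : List (Int × Int)) : Int :=
  bfsLoop remaining_components [(in_bridge, dangling)] 0

-- ===== PORT B =====
-- best's opening line: sum(a + b for a, b in bridge), a left fold as Python's sum
def alt_strength (bridge : List (Int × Int)) : Int :=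
  bridge.foldl (fun acc p => acc + (p.1 + p.2)) 0

-- the recursive helper best(bridge, dangling): iterate over the candidate list `cands`
-- (always a sublist of remaining_components, witnessed by `hsub` for termination),
-- recursing on each legal extension and keeping the running max in `acc`
def dfsGo (remaining : List (Int × Int)) (bridge : List (Int × Int)) (d : Int)
    (cands : List (Int × Int)) (hsub : ∀ c ∈ cands, c ∈ remaining) (acc : Int) : Int :=
  match cands with
  | [] => acc
  | c :: cs =>
    if h : (c.1 = d ∨ c.2 = d) ∧ c ∉ bridge then
      let nd := if c.1 = d ∧ c.2 = d then d else if c.1 = d then c.2 else c.1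
      let sub := dfsGo remaining (bridge ++ [c]) nd remaining (fun x hx => hx)
                   (alt_strength (bridge ++ [c]))
      dfsGo remaining bridge d cs (fun x hx => hsub x (List.mem_cons_of_mem _ hx)) (max acc sub)
    else
      dfsGo remaining bridge d cs (fun x hx => hsub x (List.mem_cons_of_mem _ hx)) acc
termination_by ((remaining.filter (fun x => x ∉ bridge)).length, cands.length)
decreasing_by
  · exact Prod.Lex.left _ _ (pvFilterLt remaining bridge c (hsub c (List.mem_cons_self ..)) h.2)
  · exact Prod.Lex.right _ (Nat.lt_succ_self _)
  · exact Prod.Lex.right _ (Nat.lt_succ_self _)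

def find_strongest_bridge_alt (in_bridge : List (Int × Int)) (dangling : Int) (remaining_components : List (Int × Int)) : Int :=
  max 0 (dfsGo remaining_components in_bridge dangling remaining_components (fun x hx => hx)
    (alt_strength in_bridge))

-- ===== PRECONDITION & SPEC =====
def Spec_find_strongest_bridge (in_bridge : List (Int × Int)) (dangling : Int) (remaining_components : List (Int × Int)) (out : Int) : Prop := out = find_strongest_bridge_alt in_bridge dangling remaining_components
instance (in_bridge : List (Int × Int)) (dangling : Int) (remaining_components : List (Int × Int)) (out : Int) : Decidable (Spec_find_strongest_bridge in_bridge dangling remaining_components out) := by unfold Spec_find_strongest_bridge; infer_instance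

-- ===== CLAIM (what is proved, stated in full; the proofs are below) =====
def Claim_equal_find_strongest_bridge : Prop := ∀ (in_bridge : List (Int × Int)) (dangling : Int) (remaining_components : List (Int × Int)), Dom_find_strongest_bridge in_bridge dangling remaining_components → Spec_find_strongest_bridge in_bridge dangling remaining_components (find_strongest_bridge in_bridge dangling remaining_components)

-- ===== LEMMAS AND PROOFS =====

-- B's `best(bridge, dangling)` as called on the full candidate list
def dfsBest (remaining bridge : List (Int × Int)) (d : Int) : Int :=
  dfsGo remaining bridge d remaining (fun x hx => hx) (alt_strength bridge)

theorem pvFoldlMaxRight {σ : Type} (g : σ → Int) (l : List σ) (a b : Int) :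
    l.foldl (fun m s => max m (g s)) (max a b) = max (l.foldl (fun m s => max m (g s)) a) b := by
  induction l generalizing a with
  | nil => rfl
  | cons s l ih =>
    simp only [List.foldl_cons]
    rw [max_right_comm, ih]

theorem pvFoldlMaxLeft {σ : Type} (g : σ → Int) (l : List σ) (a b : Int) :
    l.foldl (fun m s => max m (g s)) (max a b) = max a (l.foldl (fun m s => max m (g s)) b) := by
  rw [max_comm a b, pvFoldlMaxRight, max_comm]

theorem pvNdEq (c : Int × Int) (d : Int) :
    (if c.1 = d ∧ c.2 = d then d else if c.1 = d then c.2 else c.1) = pyNewDangling c d := by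
  unfold pyNewDangling
  by_cases h1 : c.1 = d <;> by_cases h2 : c.2 = d <;>
    simp [h1, h2]

theorem pvStrengthEqAux (l : List (Int × Int)) (a : Int) :
    l.foldl (fun acc p => acc + (p.1 + p.2)) a = a + (l.map (fun p => p.1 + p.2)).sum := by
  induction l generalizing a with
  | nil => simp
  | cons p l ih => simp [ih]; ring

theorem pvStrengthEq (l : List (Int × Int)) : bridge_strength l = alt_strength l := by
  rw [bridge_strength, alt_strength, pvStrengthEqAux]
  simp

theorem pvDfsGoEq (remaining bridge : List (Int × Int)) (d : Int)
    (cands : List (Int × Int)) (hsub : ∀ c ∈ cands, c ∈ remaining) (acc : Int) :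
    dfsGo remaining bridge d cands hsub acc
    = ((cands.filter (fun c => (c.1 = d ∨ c.2 = d) ∧ c ∉ bridge)).map
        (fun c => (bridge ++ [c], pyNewDangling c d))).foldl
        (fun m s => max m (dfsBest remaining s.1 s.2)) acc := by
  induction cands generalizing acc with
  | nil => simp [dfsGo]
  | cons c cs ih =>
    rw [dfsGo]
    by_cases h : (c.1 = d ∨ c.2 = d) ∧ c ∉ bridge
    · rw [dif_pos h, List.filter_cons_of_pos (by simpa using h), List.map_cons, List.foldl_cons]
      rw [ih]
      congr 1
      rw [dfsBest, ← pvNdEq]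
    · rw [dif_neg h, List.filter_cons_of_neg (by simpa using h)]
      exact ih _ _

theorem pvChildrenList (remaining bridge : List (Int × Int)) (d : Int) :
    ((remaining.filter (fun comp => comp.1 = d ∨ comp.2 = d)).filter
        (fun candidate => candidate ∉ bridge))
    = remaining.filter (fun c => (c.1 = d ∨ c.2 = d) ∧ c ∉ bridge) := by
  rw [List.filter_filter]
  congr 1
  funext c
  by_cases hb : c ∈ bridge <;> by_cases hd : (c.1 = d ∨ c.2 = d) <;> simp [hb, hd]

theorem pvBfsLoopEq (remaining : List (Int × Int))
    (queue : List (List (Int × Int) × Int)) (m : Int) :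
    bfsLoop remaining queue m
    = queue.foldl (fun m s => max m (dfsBest remaining s.1 s.2)) m := by
  induction queue, m using bfsLoop.induct remaining with
  | case1 m => simp [bfsLoop]
  | case2 bridge d rest m ih =>
    rw [bfsLoop]
    rw [ih, List.foldl_append, List.foldl_cons]
    have hch : pyChildren remaining bridge d
        = (remaining.filter (fun c => (c.1 = d ∨ c.2 = d) ∧ c ∉ bridge)).map
            (fun c => (bridge ++ [c], pyNewDangling c d)) := by
      rw [pyChildren, pvChildrenList]
    have hbest : dfsBest remaining bridge d
        = ((remaining.filter (fun c => (c.1 = d ∨ c.2 = d) ∧ c ∉ bridge)).map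
            (fun c => (bridge ++ [c], pyNewDangling c d))).foldl
            (fun m s => max m (dfsBest remaining s.1 s.2)) (alt_strength bridge) := by
      rw [dfsBest, pvDfsGoEq]
    rw [hch, hbest, pvStrengthEq]
    rw [pvFoldlMaxRight, pvFoldlMaxLeft, pvFoldlMaxRight]

-- ===== VERDICT (by name: the statement is the Claim_ definition above) =====
theorem find_strongest_bridge_spec : Claim_equal_find_strongest_bridge := by
  intro in_bridge dangling remaining _
  unfold Spec_find_strongest_bridge
  rw [find_strongest_bridge, pvBfsLoopEq, find_strongest_bridge_alt]
  simp only [List.foldl_cons, List.foldl_nil]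
  rfl
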